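-- pv_equiv track=rewrite | github.com/TalonT-Org/AutoSkillit | src/autoskillit/execution/linux_tracing.py | _parse_proc_io
-- ===== SOURCE A (Python) =====
-- def _parse_proc_io(content: str) -> tuple[int | None, int | None]:
--     """Parse /proc/{pid}/io content for read_bytes and write_bytes.
--
--     Returns (read_bytes, write_bytes). Either may be None if the field
--     is absent or unparseable.
--     """
--     read_b: int | None = None
--     write_b: int | None = None
--     for line in content.splitlines():
--         if line.startswith("read_bytes:"):
--             try:
--                 read_b = int(line.split(":", 1)[1].strip())
--             except (ValueError, IndexError):
--                 pass
--         elif line.startswith("write_bytes:"):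
--             try:
--                 write_b = int(line.split(":", 1)[1].strip())
--             except (ValueError, IndexError):
--                 pass
--     return read_b, write_b
-- ===== SOURCE B (Python) =====
-- def _parse_proc_io(content: str) -> tuple:
--     """Index each colon-separated line into a dict of parsed ints
--     (last successful parse wins), then answer with two lookups."""
--     fields = {}
--     for line in content.splitlines():
--         parts = line.split(":", 1)
--         if len(parts) == 2:
--             key, value = parts
--             try:
--                 fields[key] = int(value.strip())
--             except ValueError:
--                 pass
--     return fields.get("read_bytes"), fields.get("write_bytes")
-- ===== Notes on version B (the rewrite author's own statement) =====
-- stated objective: idiomatic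
-- what changed: Instead of A's inline per-prefix branching with two mutable result variables, B builds one generic key->int index over all 'key: value' lines (last successful parse wins) and answers with two independent dict lookups.
import Mathlib
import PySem

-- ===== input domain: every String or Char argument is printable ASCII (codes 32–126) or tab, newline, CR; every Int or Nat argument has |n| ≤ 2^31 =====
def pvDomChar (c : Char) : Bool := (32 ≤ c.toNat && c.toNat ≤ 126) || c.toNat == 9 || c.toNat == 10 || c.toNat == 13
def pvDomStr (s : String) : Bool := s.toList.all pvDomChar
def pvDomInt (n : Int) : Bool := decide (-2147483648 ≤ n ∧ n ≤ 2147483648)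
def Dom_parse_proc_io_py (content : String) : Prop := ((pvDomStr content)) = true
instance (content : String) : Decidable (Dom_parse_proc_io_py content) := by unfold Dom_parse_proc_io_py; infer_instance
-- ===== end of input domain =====

-- B re-implements the parser as a generic key->int index built in one pass plus two
-- dict lookups, instead of A's inline per-prefix branching; return value only, same cost.

-- ===== PORT A =====
-- one iteration of A's loop body over the state (read_b, write_b)
def pvStepA (st : Option Int × Option Int) (line : String) : Option Int × Option Int :=
  if PySem.Str.startswith line "read_bytes:" then
    match PySem.Str.splitMax? line ":" 1 with
    | some parts =>
      match PySem.List.pyGet? parts 1 with        -- IndexError → pass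
      | some v =>
        match PySem.Int.ofStr? (PySem.Str.strip v) with   -- ValueError → pass
        | some n => (some n, st.2)
        | none => st
      | none => st
    | none => st    -- unreachable: sep ":" is nonempty
  else if PySem.Str.startswith line "write_bytes:" then
    match PySem.Str.splitMax? line ":" 1 with
    | some parts =>
      match PySem.List.pyGet? parts 1 with
      | some v =>
        match PySem.Int.ofStr? (PySem.Str.strip v) with
        | some n => (st.1, some n)
        | none => st
      | none => st
    | none => st
  else st

def parse_proc_io_py (content : String) : Option Int × Option Int :=
  (PySem.Str.splitlines content).foldl pvStepA (none, none)

-- ===== PORT B =====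
-- one iteration of B's dict-building loop
def pvStepB (d : PySem.Dict String Int) (line : String) : PySem.Dict String Int :=
  match PySem.Str.splitMax? line ":" 1 with
  | some parts =>
    match parts with
    | [key, value] =>            -- if len(parts) == 2: key, value = parts
      match PySem.Int.ofStr? (PySem.Str.strip value) with   -- ValueError → pass
      | some n => d.insert key n
      | none => d
    | _ => d
  | none => d    -- unreachable: sep ":" is nonempty

def parse_proc_io_py_alt (content : String) : Option Int × Option Int :=
  let fields := (PySem.Str.splitlines content).foldl pvStepB PySem.Dict.empty
  (fields.get? "read_bytes", fields.get? "write_bytes")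

-- ===== PRECONDITION & SPEC =====
def Spec_parse_proc_io_py (content : String) (out : Option Int × Option Int) : Prop := out = parse_proc_io_py_alt content
instance (content : String) (out : Option Int × Option Int) : Decidable (Spec_parse_proc_io_py content out) := by unfold Spec_parse_proc_io_py; infer_instance

-- ===== CLAIM (what is proved, stated in full; the proofs are below) =====
def Claim_equal_parse_proc_io_py : Prop := ∀ (content : String), Dom_parse_proc_io_py content → Spec_parse_proc_io_py content (parse_proc_io_py content)

-- ===== LEMMAS AND PROOFS =====

-- split a char list at the first ':' (proof-side characterisation of split(":", 1))
def pvSplitC : List Char → List Char × Option (List Char)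
  | [] => ([], none)
  | c :: cs =>
    if c = ':' then ([], some cs)
    else
      let p := pvSplitC cs
      (c :: p.1, p.2)

theorem pvSplitC_spec (cs : List Char) :
    ':' ∉ (pvSplitC cs).1 ∧
      cs = (pvSplitC cs).1 ++ (match (pvSplitC cs).2 with | none => [] | some r => ':' :: r) := by
  induction cs with
  | nil => simp [pvSplitC]
  | cons c cs ih =>
    by_cases h : c = ':'
    · subst h; simp [pvSplitC]
    · simp only [pvSplitC, if_neg h]
      refine ⟨by simpa using ⟨fun hh => h hh.symm, ih.1⟩, by simpa using ih.2⟩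

theorem pvGo_m0 (sep : List Char) (fuel : Nat) (l cur : List Char) (acc' : List (List Char))
    (h : 0 < fuel) :
    PySem.Chars.splitOnMax.go sep fuel 0 l cur acc' = ((cur.reverse ++ l) :: acc').reverse := by
  cases fuel with
  | zero => omega
  | succ f => cases l <;> simp [PySem.Chars.splitOnMax.go]

theorem pvGo_one (l : List Char) : ∀ (fuel : Nat) (cur : List Char) (acc : List (List Char)),
    l.length < fuel →
    PySem.Chars.splitOnMax.go (String.toList ":") fuel 1 l cur acc =
      acc.reverse ++ (match pvSplitC l with
        | (p, none) => [cur.reverse ++ p]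
        | (p, some r) => [cur.reverse ++ p, r]) := by
  induction l with
  | nil =>
    intro fuel cur acc h
    cases fuel with
    | zero => omega
    | succ f => simp [PySem.Chars.splitOnMax.go, pvSplitC]
  | cons c cs ih =>
    intro fuel cur acc h
    cases fuel with
    | zero => omega
    | succ f =>
      have hcol : String.toList ":" = [':'] := rfl
      have hf : cs.length < f := by simp at h; omega
      by_cases hc : c = ':'
      · subst hc
        have hpre : (String.toList ":").isPrefixOf (':' :: cs) = true := by
          rw [hcol]; simp [List.isPrefixOf]
        simp only [PySem.Chars.splitOnMax.go, hcol]
        rw [if_neg (by omega)]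
        have hd : List.drop ([':'] : List Char).length (':' :: cs) = cs := by simp
        rw [hd, show (1 : Nat) - 1 = 0 from rfl,
          pvGo_m0 [':'] f cs [] (cur.reverse :: acc) (by omega)]
        simp [pvSplitC]
      · have hpre : (String.toList ":").isPrefixOf (c :: cs) = false := by
          rw [hcol]; simp [List.isPrefixOf]
          exact fun hh => (hc hh.symm).elim
        simp only [PySem.Chars.splitOnMax.go, hpre, Bool.false_eq_true, if_false]
        rw [if_neg (by omega)]
        rw [ih f (c :: cur) acc hf]
        cases hsp : pvSplitC cs with
        | mk p r => cases r <;> simp [pvSplitC, hc, hsp]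

theorem pvSplitOnMax_colon (l : List Char) :
    PySem.Chars.splitOnMax l (String.toList ":") 1 =
      (match pvSplitC l with
        | (p, none) => [p]
        | (p, some r) => [p, r]) := by
  unfold PySem.Chars.splitOnMax
  rw [if_neg (by omega), show (1 : Int).toNat = 1 from rfl]
  rw [pvGo_one l (l.length + 1) [] [] (by omega)]
  cases hsp : pvSplitC l with
  | mk p r => cases r <;> simp

-- a ':'-terminated key is a prefix exactly when the part before the first ':' is that key
theorem pvPrefix_iff (key : List Char) : ∀ (k r : List Char), ':' ∉ key → ':' ∉ k →
    ((key ++ [':']) <+: (k ++ ':' :: r) ↔ key = k) := by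
  induction key with
  | nil =>
    intro k r _ hk
    cases k with
    | nil => simp
    | cons a k' =>
      simp only [List.nil_append, List.cons_append]
      constructor
      · rintro ⟨t, ht⟩
        injection ht with h1 _
        rw [← h1] at hk
        simp at hk
      · intro hh; exact absurd hh (by simp)
  | cons a key' ih =>
    intro k r hkey hk
    cases k with
    | nil =>
      simp only [List.cons_append, List.nil_append]
      constructor
      · rintro ⟨t, ht⟩
        injection ht with h1 _
        rw [h1] at hkey
        simp at hkey
      · intro hh; simp at hh
    | cons b k' =>
      simp only [List.cons_append, List.cons_prefix_cons]
      simp only [List.mem_cons, not_or] at hkey hk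
      rw [ih k' r hkey.2 hk.2]
      constructor
      · rintro ⟨h1, h2⟩; rw [h1, h2]
      · intro hh; injection hh with h1 h2; exact ⟨h1, h2⟩

theorem pvStep_inv (d : PySem.Dict String Int) (st : Option Int × Option Int) (line : String)
    (h1 : d.get? "read_bytes" = st.1) (h2 : d.get? "write_bytes" = st.2) :
    (pvStepB d line).get? "read_bytes" = (pvStepA st line).1 ∧
      (pvStepB d line).get? "write_bytes" = (pvStepA st line).2 := by
  have hsplit : PySem.Str.splitMax? line ":" 1 =
      some ((PySem.Chars.splitOnMax line.toList (String.toList ":") 1).map String.ofList) := by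
    simp [PySem.Str.splitMax?, PySem.Chars.splitMax?]
  obtain ⟨hkcol, hcs⟩ := pvSplitC_spec line.toList
  have hR : ¬ (':' : Char) ∈ String.toList "read_bytes" := by decide
  have hW : ¬ (':' : Char) ∈ String.toList "write_bytes" := by decide
  cases hsp : (pvSplitC line.toList) with
  | mk k ropt =>
    rw [hsp] at hkcol hcs
    simp only at hkcol hcs
    cases ropt with
    | none =>
      -- no colon in the line: B skips it, and neither prefix test of A can fire
      have hparts : (PySem.Chars.splitOnMax line.toList (String.toList ":") 1).map String.ofList
          = [String.ofList k] := by rw [pvSplitOnMax_colon, hsp]; simp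
      have hnc : (':' : Char) ∉ line.toList := by
        rw [hcs]; simpa using hkcol
      have hr : PySem.Str.startswith line "read_bytes:" = false := by
        simp only [PySem.Str.startswith_eq]
        rw [Bool.eq_false_iff]
        intro hp
        rw [PySem.Chars.startswith_iff] at hp
        exact hnc (hp.subset (by decide))
      have hw : PySem.Str.startswith line "write_bytes:" = false := by
        simp only [PySem.Str.startswith_eq]
        rw [Bool.eq_false_iff]
        intro hp
        rw [PySem.Chars.startswith_iff] at hp
        exact hnc (hp.subset (by decide))
      simp only [pvStepA, pvStepB, hsplit, hparts, hr, hw, Bool.false_eq_true, if_false]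
      exact ⟨h1, h2⟩
    | some r =>
      have hparts : (PySem.Chars.splitOnMax line.toList (String.toList ":") 1).map String.ofList
          = [String.ofList k, String.ofList r] := by rw [pvSplitOnMax_colon, hsp]; simp
      have hB_ins : ∀ n, PySem.Int.ofStr? (PySem.Str.strip (String.ofList r)) = some n →
          pvStepB d line = d.insert (String.ofList k) n := by
        intro n hn; rw [pvStepB, hsplit, hparts]; simp [hn]
      have hB_skip : PySem.Int.ofStr? (PySem.Str.strip (String.ofList r)) = none →
          pvStepB d line = d := by
        intro hn; rw [pvStepB, hsplit, hparts]; simp [hn]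
      have hRiff : PySem.Str.startswith line "read_bytes:" = true ↔ k = String.toList "read_bytes" := by
        rw [PySem.Str.startswith_eq, PySem.Chars.startswith_iff]
        have hd : String.toList "read_bytes:" = String.toList "read_bytes" ++ [':'] := by decide
        rw [hd, hcs]
        exact (pvPrefix_iff _ k r hR hkcol).trans ⟨fun h => h.symm, fun h => h.symm⟩
      have hWiff : PySem.Str.startswith line "write_bytes:" = true ↔ k = String.toList "write_bytes" := by
        rw [PySem.Str.startswith_eq, PySem.Chars.startswith_iff]
        have hd : String.toList "write_bytes:" = String.toList "write_bytes" ++ [':'] := by decide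
        rw [hd, hcs]
        exact (pvPrefix_iff _ k r hW hkcol).trans ⟨fun h => h.symm, fun h => h.symm⟩
      by_cases hkr : k = String.toList "read_bytes"
      · have hstart : PySem.Str.startswith line "read_bytes:" = true := hRiff.mpr hkr
        have hk : String.ofList k = "read_bytes" := by rw [hkr]; exact String.ofList_toList
        cases hn : PySem.Int.ofStr? (PySem.Str.strip (String.ofList r)) with
        | none =>
          have hA : pvStepA st line = st := by
            rw [pvStepA, if_pos hstart, hsplit, hparts]
            simp [PySem.List.pyGet?, PySem.List.pyIdx?, hn]
          rw [hB_skip hn, hA]; exact ⟨h1, h2⟩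
        | some n =>
          have hA : pvStepA st line = (some n, st.2) := by
            rw [pvStepA, if_pos hstart, hsplit, hparts]
            simp [PySem.List.pyGet?, PySem.List.pyIdx?, hn]
          rw [hB_ins n hn, hA, hk]
          exact ⟨PySem.Dict.get?_insert_self d "read_bytes" n,
            (PySem.Dict.get?_insert_of_ne d n (by decide)).trans h2⟩
      · have hnr : ¬ PySem.Str.startswith line "read_bytes:" = true := fun hh => hkr (hRiff.mp hh)
        by_cases hkw : k = String.toList "write_bytes"
        · have hstart : PySem.Str.startswith line "write_bytes:" = true := hWiff.mpr hkw
          have hk : String.ofList k = "write_bytes" := by rw [hkw]; exact String.ofList_toList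
          cases hn : PySem.Int.ofStr? (PySem.Str.strip (String.ofList r)) with
          | none =>
            have hA : pvStepA st line = st := by
              rw [pvStepA, if_neg hnr, if_pos hstart, hsplit, hparts]
              simp [PySem.List.pyGet?, PySem.List.pyIdx?, hn]
            rw [hB_skip hn, hA]; exact ⟨h1, h2⟩
          | some n =>
            have hA : pvStepA st line = (st.1, some n) := by
              rw [pvStepA, if_neg hnr, if_pos hstart, hsplit, hparts]
              simp [PySem.List.pyGet?, PySem.List.pyIdx?, hn]
            rw [hB_ins n hn, hA, hk]
            exact ⟨(PySem.Dict.get?_insert_of_ne d n (by decide)).trans h1,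
              PySem.Dict.get?_insert_self d "write_bytes" n⟩
        · -- some other key: B may index it, but the two lookups are unaffected
          have hnw : ¬ PySem.Str.startswith line "write_bytes:" = true := fun hh => hkw (hWiff.mp hh)
          have hA : pvStepA st line = st := by rw [pvStepA, if_neg hnr, if_neg hnw]
          have hne_r : "read_bytes" ≠ String.ofList k := by
            intro hh; apply hkr; simpa using (congrArg String.toList hh).symm
          have hne_w : "write_bytes" ≠ String.ofList k := by
            intro hh; apply hkw; simpa using (congrArg String.toList hh).symm
          cases hn : PySem.Int.ofStr? (PySem.Str.strip (String.ofList r)) with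
          | none => rw [hB_skip hn, hA]; exact ⟨h1, h2⟩
          | some n =>
            rw [hB_ins n hn, hA]
            exact ⟨(PySem.Dict.get?_insert_of_ne d n hne_r).trans h1,
              (PySem.Dict.get?_insert_of_ne d n hne_w).trans h2⟩

theorem pvFold_inv (lines : List String) : ∀ (d : PySem.Dict String Int) (st : Option Int × Option Int),
    d.get? "read_bytes" = st.1 → d.get? "write_bytes" = st.2 →
    ((lines.foldl pvStepB d).get? "read_bytes" = (lines.foldl pvStepA st).1 ∧
      (lines.foldl pvStepB d).get? "write_bytes" = (lines.foldl pvStepA st).2) := by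
  induction lines with
  | nil => intro d st h1 h2; exact ⟨h1, h2⟩
  | cons l ls ih =>
    intro d st h1 h2
    obtain ⟨g1, g2⟩ := pvStep_inv d st l h1 h2
    exact ih (pvStepB d l) (pvStepA st l) g1 g2

-- ===== VERDICT (by name: the statement is the Claim_ definition above) =====
theorem parse_proc_io_py_spec : Claim_equal_parse_proc_io_py := by
  intro content _
  unfold Spec_parse_proc_io_py parse_proc_io_py parse_proc_io_py_alt
  obtain ⟨g1, g2⟩ := pvFold_inv (PySem.Str.splitlines content) PySem.Dict.empty (none, none)
    (by simp [pysem]) (by simp [pysem])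
  exact Prod.ext_iff.mpr ⟨g1.symm, g2.symm⟩
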